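-- pv_equiv track=rewrite | github.com/dapper91/contests | geeksforgeeks/save-gotham.py | heights_sum
-- ===== SOURCE A (Python) =====
-- def heights_sum(towers):
--     stack = []
--     hsum = 0
--
--     for height in reversed(towers):
--         while stack and height >= stack[-1]:
--             stack.pop()
--
--         if stack:
--             hsum = (hsum + stack[-1]) % 1000000001
--         stack.append(height)
--
--     return hsum
-- ===== SOURCE B (Python) =====
-- def first_greater(h, rest):
--     for v in rest:
--         if v > h:
--             return v
--     return None
--
--
-- def heights_sum(towers):
--     hsum = 0
--     for i, h in enumerate(towers):
--         v = first_greater(h, towers[i + 1:])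
--         if v is not None:
--             hsum = (hsum + v) % 1000000001
--     return hsum
-- ===== Notes on version B (the rewrite author's own statement) =====
-- stated objective: simpler
-- what changed: Replaces the reversed-order monotonic stack with a plain forward scan: for each element, add the first strictly greater element to its right (mod 1000000001).
import Mathlib
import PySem

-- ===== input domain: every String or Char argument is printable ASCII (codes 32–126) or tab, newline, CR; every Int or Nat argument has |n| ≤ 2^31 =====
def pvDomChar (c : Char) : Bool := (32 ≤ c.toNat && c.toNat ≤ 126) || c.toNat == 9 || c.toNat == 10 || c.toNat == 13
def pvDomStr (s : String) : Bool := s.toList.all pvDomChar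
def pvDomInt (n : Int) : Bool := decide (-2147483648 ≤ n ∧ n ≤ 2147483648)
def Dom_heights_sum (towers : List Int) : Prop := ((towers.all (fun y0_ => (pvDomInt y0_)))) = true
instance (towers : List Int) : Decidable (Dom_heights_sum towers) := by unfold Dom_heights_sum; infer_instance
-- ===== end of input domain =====

-- B replaces A's reversed-order monotonic stack by a plain forward scan: for each
-- element, add the first strictly greater element to its right (objective: simpler).

-- ===== PORT A =====
-- state: (stack with top at head, hsum); 'for height in reversed(towers)' = foldl over towers.reverse
def heights_sum (towers : List Int) : Int :=
  (towers.reverse.foldl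
    (fun (st : List Int × Int) height =>
      let stack := st.1.dropWhile (fun t => decide (height ≥ t))   -- while stack and height >= stack[-1]: pop
      (height :: stack,                                            -- stack.append(height)
        if stack.isEmpty then st.2
        else PySem.Int.mod (st.2 + stack.head!) 1000000001))       -- hsum = (hsum + stack[-1]) % 1000000001
    ([], 0)).2

-- ===== PORT B =====
-- first_greater(h, rest): first v in rest with v > h
def pvFirstGreater (h : Int) : List Int → Option Int
  | [] => none
  | v :: rest => if v > h then some v else pvFirstGreater h rest

-- the loop over enumerate(towers) with towers[i+1:] = structural recursion over successive tails
def pvGoB (acc : Int) : List Int → Int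
  | [] => acc
  | h :: rest =>
    match pvFirstGreater h rest with
    | some v => pvGoB (PySem.Int.mod (acc + v) 1000000001) rest
    | none => pvGoB acc rest

def heights_sum_alt (towers : List Int) : Int := pvGoB 0 towers

-- ===== PRECONDITION & SPEC =====
def Spec_heights_sum (towers : List Int) (out : Int) : Prop := out = heights_sum_alt towers
instance (towers : List Int) (out : Int) : Decidable (Spec_heights_sum towers out) := by unfold Spec_heights_sum; infer_instance

-- ===== CLAIM (what is proved, stated in full; the proofs are below) =====
def Claim_equal_heights_sum : Prop := ∀ (towers : List Int), Dom_heights_sum towers → Spec_heights_sum towers (heights_sum towers)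

-- ===== LEMMAS AND PROOFS =====

-- structural-recursion form of A's fold (processes the list right-to-left)
def pvRunA : List Int → List Int × Int
  | [] => ([], 0)
  | x :: rest =>
    let p := pvRunA rest
    let stack := p.1.dropWhile (fun t => decide (x ≥ t))
    (x :: stack,
      if stack.isEmpty then p.2
      else PySem.Int.mod (p.2 + stack.head!) 1000000001)

theorem pvRunA_eq_foldl (towers : List Int) :
    (towers.reverse.foldl
      (fun (st : List Int × Int) height =>
        let stack := st.1.dropWhile (fun t => decide (height ≥ t))
        (height :: stack,
          if stack.isEmpty then st.2
          else PySem.Int.mod (st.2 + stack.head!) 1000000001))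
      ([], 0)) = pvRunA towers := by
  induction towers with
  | nil => rfl
  | cons x rest ih =>
    rw [List.reverse_cons, List.foldl_append, ih, List.foldl_cons, List.foldl_nil]
    rfl

theorem pv_dropWhile_dropWhile {p q : Int → Bool} (h : ∀ a, q a = true → p a = true)
    (l : List Int) : (l.dropWhile q).dropWhile p = l.dropWhile p := by
  induction l with
  | nil => rfl
  | cons a t ih =>
    by_cases hq : q a = true
    · rw [List.dropWhile_cons_of_pos hq, List.dropWhile_cons_of_pos (h a hq), ih]
    · rw [List.dropWhile_cons_of_neg hq]

-- the key invariant: popping A's stack down to the first element > h reveals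
-- exactly the first element of the (right-side) list that is > h
theorem pv_stack_firstGreater (rest : List Int) (h : Int) :
    ((pvRunA rest).1.dropWhile (fun t => decide (h ≥ t))).head? = pvFirstGreater h rest := by
  induction rest generalizing h with
  | nil => rfl
  | cons x t ih =>
    show ((x :: (pvRunA t).1.dropWhile (fun s => decide (x ≥ s))).dropWhile
        (fun s => decide (h ≥ s))).head? = pvFirstGreater h (x :: t)
    by_cases hx : x > h
    · rw [List.dropWhile_cons_of_neg (by simp; omega)]
      simp [pvFirstGreater, hx]
    · rw [List.dropWhile_cons_of_pos (by simp; omega)]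
      rw [pv_dropWhile_dropWhile (by intro a ha; simp at ha ⊢; omega)]
      simp [pvFirstGreater, hx]
      exact ih h

-- the list of contributions (first strictly greater element to the right, per position)
def pvContribs : List Int → List Int
  | [] => []
  | x :: rest =>
    (match pvFirstGreater x rest with
     | some v => [v]
     | none => []) ++ pvContribs rest

theorem pv_mod_add_mod (a b : Int) :
    PySem.Int.mod (PySem.Int.mod a 1000000001 + b) 1000000001 =
      PySem.Int.mod (a + b) 1000000001 := by
  simp only [PySem.Int.mod_eq_emod_of_pos (by norm_num : (0:Int) < 1000000001)]
  conv_rhs => rw [Int.add_emod]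
  rw [Int.add_emod (a % 1000000001)]
  simp [Int.emod_emod_of_dvd]

theorem pvGoB_eq (l : List Int) : ∀ acc : Int,
    pvGoB acc l = if pvContribs l = [] then acc
      else PySem.Int.mod (acc + (pvContribs l).sum) 1000000001 := by
  induction l with
  | nil => intro acc; simp [pvGoB, pvContribs]
  | cons x rest ih =>
    intro acc
    cases hfg : pvFirstGreater x rest with
    | none => simp [pvGoB, hfg, pvContribs, ih]
    | some v =>
      simp only [pvGoB, hfg, pvContribs, ih]
      by_cases hc : pvContribs rest = []
      · simp [hc]
      · simp only [hc, List.cons_append, List.nil_append, List.cons_ne_nil,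
          if_false, List.sum_cons]
        rw [pv_mod_add_mod]
        ring_nf

theorem pvRunA_snd (l : List Int) :
    (pvRunA l).2 = if pvContribs l = [] then 0
      else PySem.Int.mod (pvContribs l).sum 1000000001 := by
  induction l with
  | nil => rfl
  | cons x rest ih =>
    have hkey := pv_stack_firstGreater rest x
    show (let stack := (pvRunA rest).1.dropWhile (fun t => decide (x ≥ t));
      if stack.isEmpty then (pvRunA rest).2
      else PySem.Int.mod ((pvRunA rest).2 + stack.head!) 1000000001) = _
    cases hfg : pvFirstGreater x rest with
    | none =>
      rw [hfg] at hkey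
      have hemp : (pvRunA rest).1.dropWhile (fun t => decide (x ≥ t)) = [] :=
        List.head?_eq_none_iff.mp hkey
      simp [hemp, ih, pvContribs, hfg]
    | some v =>
      rw [hfg] at hkey
      have hne : ((pvRunA rest).1.dropWhile (fun t => decide (x ≥ t))).isEmpty = false := by
        cases hL : (pvRunA rest).1.dropWhile (fun t => decide (x ≥ t)) with
        | nil => rw [hL] at hkey; simp at hkey
        | cons a t => simp
      have hh : ((pvRunA rest).1.dropWhile (fun t => decide (x ≥ t))).head! = v := by
        cases hL : (pvRunA rest).1.dropWhile (fun t => decide (x ≥ t)) with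
        | nil => rw [hL] at hkey; simp at hkey
        | cons a t => rw [hL] at hkey; simp at hkey; simp [hkey]
      simp only [hne, Bool.false_eq_true, if_false, hh, ih, pvContribs, hfg]
      by_cases hc : pvContribs rest = []
      · simp [hc]
      · simp only [hc, List.cons_append, List.nil_append, List.cons_ne_nil,
          if_false, List.sum_cons]
        rw [pv_mod_add_mod, Int.add_comm]

-- ===== VERDICT (by name: the statement is the Claim_ definition above) =====
theorem heights_sum_spec : Claim_equal_heights_sum := by
  intro towers _
  show heights_sum towers = heights_sum_alt towers
  unfold heights_sum heights_sum_alt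
  rw [pvRunA_eq_foldl, pvRunA_snd, pvGoB_eq]
  split <;> simp
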